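-- pv_equiv track=rewrite | github.com/kai-denrei/braille-lab | play.py | grid_to_braille
-- ===== SOURCE A (Python) =====
-- DOT_BITS = [
--     [0x01, 0x08],
--     [0x02, 0x10],
--     [0x04, 0x20],
--     [0x40, 0x80],
-- ]
--
-- def grid_to_braille(grid, cell_cols, cell_rows):
--     lines = []
--     for cr in range(cell_rows):
--         line = ''
--         for cc in range(cell_cols):
--             mask = 0
--             for r in range(4):
--                 for c in range(2):
--                     gr = cr * 4 + r
--                     gc = cc * 2 + c
--                     if gr < len(grid) and gc < len(grid[0]) and grid[gr][gc]:
--                         mask |= DOT_BITS[r][c]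
--             line += chr(0x2800 + mask)
--         lines.append(line)
--     return lines
-- ===== SOURCE B (Python) =====
-- DOT_BITS = [
--     [0x01, 0x08],
--     [0x02, 0x10],
--     [0x04, 0x20],
--     [0x40, 0x80],
-- ]
--
-- def grid_to_braille(grid, cell_cols, cell_rows):
--     # Input-driven scatter: one pass over the used part of the grid into a mask table.
--     masks = [[0] * cell_cols for _ in range(cell_rows)]
--     if grid:
--         h = min(len(grid), 4 * cell_rows)
--         w = min(len(grid[0]), 2 * cell_cols)
--         for gy in range(h):
--             row = grid[gy]
--             for gx in range(w):
--                 if row[gx]: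
--                     masks[gy // 4][gx // 2] |= DOT_BITS[gy % 4][gx % 2]
--     return [''.join(chr(0x2800 + m) for m in row) for row in masks]
-- ===== Notes on version B (the rewrite author's own statement) =====
-- stated objective: faster
-- what changed: A gathers each braille cell's mask by probing 8 grid positions per output cell, re-checking both bounds on every probe and growing each line by repeated string concatenation; B makes one input-driven pass over the clipped grid region, scattering each lit pixel's dot bit into a pre-allocated cell_rows x cell_cols mask table, then renders the table with join.
import Mathlib
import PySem

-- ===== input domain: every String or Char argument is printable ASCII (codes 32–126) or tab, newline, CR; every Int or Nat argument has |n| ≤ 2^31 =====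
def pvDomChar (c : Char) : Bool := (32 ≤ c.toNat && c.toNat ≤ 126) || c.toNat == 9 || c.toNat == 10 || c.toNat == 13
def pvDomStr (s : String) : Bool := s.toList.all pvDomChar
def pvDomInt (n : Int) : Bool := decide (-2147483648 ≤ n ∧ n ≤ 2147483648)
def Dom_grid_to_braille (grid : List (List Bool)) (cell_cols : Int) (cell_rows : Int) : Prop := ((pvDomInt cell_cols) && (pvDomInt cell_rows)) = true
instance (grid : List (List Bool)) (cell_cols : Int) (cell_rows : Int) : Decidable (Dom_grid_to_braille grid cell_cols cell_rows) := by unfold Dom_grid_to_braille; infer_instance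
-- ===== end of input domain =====

-- B replaces A's output-driven per-cell gather (8 grid probes per braille cell) by a single
-- input-driven pass over the used part of the grid that scatters dot bits into a mask table
-- (objective: alternative decomposition; return values proved equal on Pre_).

-- ===== PORT A =====
-- DOT_BITS
def pvDotBits : List (List Nat) := [[0x01, 0x08], [0x02, 0x10], [0x04, 0x20], [0x40, 0x80]]

def grid_to_braille (grid : List (List Bool)) (cell_cols : Int) (cell_rows : Int) : List String :=
  -- for cr in range(cell_rows): … lines.append(line)
  (PySem.List.pyRange 0 cell_rows).foldl (fun lines cr =>
    lines ++ [ -- line = ''  then  line += chr(0x2800 + mask)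
      (PySem.List.pyRange 0 cell_cols).foldl (fun line cc =>
        let mask : Nat :=
          (PySem.List.pyRange 0 4).foldl (fun m r =>
            (PySem.List.pyRange 0 2).foldl (fun m c =>
              let gr := cr * 4 + r
              let gc := cc * 2 + c
              -- if gr < len(grid) and gc < len(grid[0]) and grid[gr][gc]
              -- (grid[0] is only reached when the first guard holds, so grid ≠ []; the
              --  grid[gr][gc] access is in range under Pre_, where getD is exact)
              if gr < (grid.length : Int) ∧ gc < ((grid.headD []).length : Int) ∧
                  (grid.getD gr.toNat []).getD gc.toNat false then
                m ||| ((pvDotBits.getD r.toNat []).getD c.toNat 0)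
              else m) m) 0
        line.push (Char.ofNat (0x2800 + mask))) "" ]) []

-- ===== PORT B =====
def grid_to_braille_alt (grid : List (List Bool)) (cell_cols : Int) (cell_rows : Int) : List String :=
  -- masks = [[0]*cell_cols for _ in range(cell_rows)]
  let masks0 : List (List Nat) :=
    (PySem.List.pyRange 0 cell_rows).map (fun _ => List.replicate cell_cols.toNat 0)
  let masks : List (List Nat) :=
    if grid.isEmpty then masks0  -- if grid:
    else
      let h : Int := min (grid.length : Int) (4 * cell_rows)
      let w : Int := min ((grid.headD []).length : Int) (2 * cell_cols)
      (PySem.List.pyRange 0 h).foldl (fun t gr =>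
        let row := grid.getD gr.toNat []          -- row = grid[gr]  (in range: gr < h ≤ len(grid))
        (PySem.List.pyRange 0 w).foldl (fun t gc =>
          if row.getD gc.toNat false then         -- if row[gc]:  (in range under Pre_, where getD is exact)
            t.modify (PySem.Int.floordiv gr 4).toNat (fun mrow =>
              mrow.modify (PySem.Int.floordiv gc 2).toNat (fun m =>
                m ||| ((pvDotBits.getD (PySem.Int.mod gr 4).toNat []).getD (PySem.Int.mod gc 2).toNat 0)))
          else t) t) masks0
  -- [''.join(chr(0x2800 + m) for m in row) for row in masks]
  masks.map (fun mrow => String.ofList (mrow.map (fun m => Char.ofNat (0x2800 + m))))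

-- ===== PRECONDITION & SPEC =====
-- Pre_ excludes exactly the inputs where Python A raises IndexError: a ragged row inside the
-- scanned area that is shorter than the scanned width min(len(grid[0]), 2*cell_cols)
-- (Python B raises on exactly the same inputs).
def Pre_grid_to_braille (grid : List (List Bool)) (cell_cols : Int) (cell_rows : Int) : Prop :=
  ∀ i, i < min grid.length (4 * cell_rows).toNat →
    min (grid.headD []).length (2 * cell_cols).toNat ≤ (grid.getD i []).length
instance (grid : List (List Bool)) (cell_cols : Int) (cell_rows : Int) : Decidable (Pre_grid_to_braille grid cell_cols cell_rows) := by unfold Pre_grid_to_braille; infer_instance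

def pvWitness_grid_to_braille : List (List Bool) × Int × Int :=
  ([[true, false, true], [false, true, true]], 2, 1)

def Spec_grid_to_braille (grid : List (List Bool)) (cell_cols : Int) (cell_rows : Int) (out : List String) : Prop := out = grid_to_braille_alt grid cell_cols cell_rows
instance (grid : List (List Bool)) (cell_cols : Int) (cell_rows : Int) (out : List String) : Decidable (Spec_grid_to_braille grid cell_cols cell_rows out) := by unfold Spec_grid_to_braille; infer_instance

-- ===== CLAIM (what is proved, stated in full; the proofs are below) =====
def Claim_equal_grid_to_braille : Prop := ∀ (grid : List (List Bool)) (cell_cols : Int) (cell_rows : Int), Dom_grid_to_braille grid cell_cols cell_rows → Pre_grid_to_braille grid cell_cols cell_rows → Spec_grid_to_braille grid cell_cols cell_rows (grid_to_braille grid cell_cols cell_rows)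

-- ===== LEMMAS AND PROOFS =====
-- Both ports are reduced to the same closed description: one braille line per cr < cell_rows,
-- one char per cc < cell_cols, whose mask is pvCellMask (A''s per-cell gather).  The A side is a
-- direct unfolding; the B side characterises the entry of the scattered mask table by a fold
-- over the band of grid indices that targets that entry.

def pvCellMask (grid : List (List Bool)) (cri cci : Nat) : Nat :=
  (List.range 4).foldl (fun m r =>
    (List.range 2).foldl (fun m c =>
      if 4 * cri + r < grid.length ∧ 2 * cci + c < (grid.headD []).length ∧
          (grid.getD (4 * cri + r) []).getD (2 * cci + c) false then
        m ||| ((pvDotBits.getD r []).getD c 0)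
      else m) m) 0

theorem pvRangeInt (h : Int) :
    PySem.List.pyRange 0 h = (List.range h.toNat).map (fun k : Nat => (k : Int)) := by
  rcases h with h | h
  · exact PySem.List.pyRange_zero_natCast h
  · simp [PySem.List.pyRange]

theorem pvFoldPush {α : Type} (l : List α) (f : α → Char) (s : String) :
    l.foldl (fun st x => st.push (f x)) s = String.ofList (s.toList ++ l.map f) := by
  induction l generalizing s with
  | nil => simp [String.ofList_toList]
  | cons a l ih => simp [List.foldl_cons, ih, String.toList_push]

theorem pvMaskEq (grid : List (List Bool)) (cri cci : Nat) :
    (PySem.List.pyRange 0 4).foldl (fun m r =>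
      (PySem.List.pyRange 0 2).foldl (fun m c =>
        if (cri : Int) * 4 + r < (grid.length : Int) ∧ (cci : Int) * 2 + c < ((grid.headD []).length : Int) ∧
            (grid.getD ((cri : Int) * 4 + r).toNat []).getD ((cci : Int) * 2 + c).toNat false then
          m ||| ((pvDotBits.getD r.toNat []).getD c.toNat 0)
        else m) m) 0 = pvCellMask grid cri cci := by
  rw [pvRangeInt 4, pvRangeInt 2]
  simp only [List.foldl_map]
  unfold pvCellMask
  apply PySem.List.foldl_congr_mem
  intro m r hr
  apply PySem.List.foldl_congr_mem
  intro m c hc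
  rw [show ((cri : Int) * 4 + (r:Int)).toNat = 4 * cri + r from by omega,
      show ((cci : Int) * 2 + (c:Int)).toNat = 2 * cci + c from by omega,
      show ((r:Int)).toNat = r from by omega, show ((c:Int)).toNat = c from by omega]
  apply if_congr _ rfl rfl
  constructor
  · rintro ⟨a, b, d⟩; exact ⟨by omega, by omega, d⟩
  · rintro ⟨a, b, d⟩; exact ⟨by omega, by omega, d⟩

theorem pvA_eq (grid : List (List Bool)) (cell_cols cell_rows : Int) :
    grid_to_braille grid cell_cols cell_rows =
      (List.range cell_rows.toNat).map (fun cri =>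
        String.ofList ((List.range cell_cols.toNat).map (fun cci =>
          Char.ofNat (0x2800 + pvCellMask grid cri cci)))) := by
  unfold grid_to_braille
  rw [pvRangeInt cell_rows, pvRangeInt cell_cols]
  simp only [List.foldl_map]
  rw [PySem.List.foldl_append_singleton_eq_map]
  simp only [List.nil_append]
  apply List.map_congr_left
  intro cri _
  rw [pvFoldPush]
  simp only [String.toList_empty, List.nil_append]
  congr 1
  apply List.map_congr_left
  intro cci _
  rw [pvMaskEq grid cri cci]

theorem pvGetD_modify {β : Type} (l : List β) (i y : Nat) (f : β → β) (d : β) (hy : y < l.length) :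
    (l.modify i f).getD y d = if i = y then f (l.getD y d) else l.getD y d := by
  simp only [List.getD_eq_getElem?_getD, List.getElem?_modify]
  have h : l[y]? = some l[y] := List.getElem?_eq_some_iff.mpr ⟨hy, rfl⟩
  rw [h]
  simp only [Option.getD_some]
  split <;> rfl

theorem pvLenD_modify {β : Type} (t : List (List β)) (i x : Nat) (f : List β → List β)
    (hf : ∀ r, (f r).length = r.length) :
    ((t.modify i f).getD x []).length = (t.getD x []).length := by
  simp only [List.getD_eq_getElem?_getD, List.getElem?_modify]
  cases h : t[x]? with
  | none => simp
  | some v => simp only [Option.getD_some]; split <;> simp [hf]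

-- entry of a table after a fold of guarded single-entry modifies

theorem pvEntryFoldl {α : Type} (L : List α) (P : α → Bool) (i j : α → Nat) (g : α → Nat → Nat) :
    ∀ (t : List (List Nat)) (x y : Nat), x < t.length → y < (t.getD x []).length →
    (((L.foldl (fun t a => if P a then t.modify (i a) (fun row => row.modify (j a) (g a)) else t) t).getD x []).getD y 0)
    = L.foldl (fun m a => if P a ∧ i a = x ∧ j a = y then g a m else m) ((t.getD x []).getD y 0) := by
  induction L with
  | nil => intro t x y _ _; simp
  | cons a L ih =>
    intro t x y hx hy
    simp only [List.foldl_cons]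
    by_cases hP : P a
    · simp only [hP, if_true, true_and]
      have hxl : x < (t.modify (i a) (fun row => row.modify (j a) (g a))).length := by
        simpa [List.length_modify] using hx
      have hget : (t.modify (i a) (fun row => row.modify (j a) (g a))).getD x [] =
          (if i a = x then (t.getD x []).modify (j a) (g a) else t.getD x []) := by
        rw [pvGetD_modify t (i a) x _ [] hx]
      have hyl : y < ((t.modify (i a) (fun row => row.modify (j a) (g a))).getD x []).length := by
        rw [hget]; split <;> simpa [List.length_modify] using hy
      rw [ih _ x y hxl hyl]
      congr 1
      rw [hget]
      by_cases hi : i a = x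
      · simp only [hi, if_true, true_and]
        rw [pvGetD_modify _ (j a) y (g a) 0 hy]
      · simp [hi]
    · simp only [hP, Bool.false_eq_true, if_false, false_and]
      exact ih t x y hx hy

-- shape preservation

theorem pvShapeFoldl {α : Type} (L : List α) (P : α → Bool) (i j : α → Nat) (g : α → Nat → Nat) :
    ∀ (t : List (List Nat)),
    ((L.foldl (fun t a => if P a then t.modify (i a) (fun row => row.modify (j a) (g a)) else t) t).length = t.length)
    ∧ ∀ x, ((L.foldl (fun t a => if P a then t.modify (i a) (fun row => row.modify (j a) (g a)) else t) t).getD x []).length = (t.getD x []).length := by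
  induction L with
  | nil => intro t; simp
  | cons a L ih =>
    intro t
    simp only [List.foldl_cons]
    refine ⟨?_, ?_⟩
    · rw [(ih _).1]; split <;> simp [List.length_modify]
    · intro x
      rw [(ih _).2]
      split
      · exact pvLenD_modify t (i a) x _ (fun r => List.length_modify _ _ _)
      · rfl

theorem pvDivEq (n k q : Nat) (hk : 0 < k) : n / k = q ↔ k*q ≤ n ∧ n < k*q+k := by
  constructor
  · rintro rfl
    refine ⟨Nat.mul_div_le n k, ?_⟩
    have h := Nat.mod_lt n hk
    have h2 := Nat.div_add_mod n k
    nlinarith [Nat.mul_div_le n k]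
  · rintro ⟨h1, h2⟩
    exact Nat.div_eq_of_lt_le (by linarith) (by nlinarith)

theorem pvFilterDiv (k q : Nat) (hk : 0 < k) :
    ∀ n, (List.range n).filter (fun v => v / k == q) = List.range' (k*q) (min n (k*q+k) - k*q) := by
  intro n
  induction n with
  | zero => simp
  | succ n ih =>
    rw [List.range_succ, List.filter_append, ih]
    have hdiv := pvDivEq n k q hk
    by_cases h1 : n / k = q
    · obtain ⟨hb1, hb2⟩ := hdiv.mp h1
      have hfil : List.filter (fun v => v / k == q) [n] = [n] := by simp [h1]
      rw [hfil]
      have e1 : min (n+1) (k*q+k) - k*q = (min n (k*q+k) - k*q)+1 ∧ k*q + 1*(min n (k*q+k) - k*q) = n := by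
        rw [Nat.min_eq_left (Nat.le_of_lt hb2), Nat.min_eq_left (by omega : n+1 ≤ k*q+k)]
        omega
      rw [e1.1, List.range'_concat, e1.2]
    · have hb : ¬(k*q ≤ n ∧ n < k*q+k) := fun hc => h1 (hdiv.mpr hc)
      have hnb : n < k*q ∨ k*q+k ≤ n := by
        rcases Nat.lt_or_ge n (k*q) with h2 | h2
        · exact Or.inl h2
        · rcases Nat.lt_or_ge n (k*q+k) with h3 | h3
          · exact absurd ⟨h2, h3⟩ hb
          · exact Or.inr h3
      have e1 : min (n+1) (k*q+k) - k*q = min n (k*q+k) - k*q := by omega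
      simp [h1, e1]

theorem pvFoldBand (a d n : Nat) (F : Nat → Nat → Nat) (hd : d ≤ n) (m : Nat) :
    (List.range' a d).foldl (fun m x => F x m) m
    = (List.range n).foldl (fun m r => if r < d then F (a+r) m else m) m := by
  rw [List.range'_eq_map_range, List.foldl_map]
  have hsplit : List.range n = List.range d ++ List.range' d (n-d) := by
    rw [List.range_eq_range' (n := n), List.range_eq_range' (n := d)]
    have h0 : List.range' d (n-d) = List.range' (0+1*d) (n-d) := by norm_num
    rw [h0, List.range'_append]
    congr 1
    omega
  rw [hsplit, List.foldl_append]
  have h2 : ∀ (mm : Nat), (List.range' d (n-d)).foldl (fun m r => if r < d then F (a+r) m else m) mm = mm := by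
    intro mm
    rw [PySem.List.foldl_congr_mem (g := fun a _ => a)]
    · exact List.foldl_fixed _
    · intro acc x hx
      have := List.mem_range'_1.mp hx
      simp only [if_neg (by omega : ¬ x < d)]
  rw [h2]
  apply PySem.List.foldl_congr_mem
  intro acc x hx
  rw [if_pos (List.mem_range.mp hx)]

theorem pvFlatMapIte {a b : Type} (l : List a) (q : a -> Bool) (F : a -> List b) :
    l.flatMap (fun x => if q x then F x else []) = (l.filter q).flatMap F := by
  induction l with
  | nil => simp
  | cons x l ih =>
    by_cases h : q x <;> simp [h, ih]

def pvScatter (grid : List (List Bool)) (hN wN : Nat) (t0 : List (List Nat)) : List (List Nat) :=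
  ((List.range hN).flatMap (fun gr => (List.range wN).map (Prod.mk gr))).foldl
    (fun t a => if (grid.getD a.1 []).getD a.2 false then
        t.modify (a.1 / 4) (fun row => row.modify (a.2 / 2) (fun m =>
          m ||| ((pvDotBits.getD (a.1 % 4) []).getD (a.2 % 2) 0)))
      else t) t0

theorem pvAlt_eq_scatter (grid : List (List Bool)) (cell_cols cell_rows : Int) :
    grid_to_braille_alt grid cell_cols cell_rows =
    (if grid.isEmpty then List.replicate cell_rows.toNat (List.replicate cell_cols.toNat 0)
     else pvScatter grid (min (grid.length : Int) (4 * cell_rows)).toNat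
            (min ((grid.headD []).length : Int) (2 * cell_cols)).toNat
            (List.replicate cell_rows.toNat (List.replicate cell_cols.toNat 0))).map
      (fun mrow => String.ofList (mrow.map (fun m => Char.ofNat (0x2800 + m)))) := by
  unfold grid_to_braille_alt pvScatter
  have hmap0 : (PySem.List.pyRange 0 cell_rows).map (fun _ => List.replicate cell_cols.toNat 0)
      = List.replicate cell_rows.toNat (List.replicate cell_cols.toNat 0) := by
    rw [pvRangeInt, List.map_map]
    simp only [Function.comp_def]
    rw [List.map_const', List.length_range]
  by_cases hg : grid.isEmpty
  · simp only [if_pos hg, hmap0]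
  · simp only [if_neg hg, hmap0]
    refine congrArg _ ?_
    simp only [pvRangeInt, List.foldl_map]
    rw [List.foldl_flatMap]
    apply PySem.List.foldl_congr_mem
    intro t gr _
    rw [List.foldl_map]
    apply PySem.List.foldl_congr_mem
    intro t2 gc _
    have e1 : (PySem.Int.floordiv (gr : Int) 4).toNat = gr / 4 := by
      rw [PySem.Int.floordiv_eq_ediv_of_pos (by norm_num)]; omega
    have e2 : (PySem.Int.floordiv (gc : Int) 2).toNat = gc / 2 := by
      rw [PySem.Int.floordiv_eq_ediv_of_pos (by norm_num)]; omega
    have e3 : (PySem.Int.mod (gr : Int) 4).toNat = gr % 4 := by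
      rw [PySem.Int.mod_eq_emod_of_pos (by norm_num)]; omega
    have e4 : (PySem.Int.mod (gc : Int) 2).toNat = gc % 2 := by
      rw [PySem.Int.mod_eq_emod_of_pos (by norm_num)]; omega
    simp only [Int.toNat_natCast, e1, e2, e3, e4]

theorem pvScatterEntry (grid : List (List Bool)) (hN wN x y : Nat) (t0 : List (List Nat))
    (hx : x < t0.length) (hy : y < (t0.getD x []).length) (h0 : (t0.getD x []).getD y 0 = 0)
    (hH : ∀ r, r < 4 → (4*x+r < hN ↔ 4*x+r < grid.length))
    (hW : ∀ c, c < 2 → (2*y+c < wN ↔ 2*y+c < (grid.headD []).length)) :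
    ((pvScatter grid hN wN t0).getD x []).getD y 0 = pvCellMask grid x y := by
  unfold pvScatter
  have hE := pvEntryFoldl ((List.range hN).flatMap (fun gr => (List.range wN).map (Prod.mk gr)))
      (fun a : Nat × Nat => (grid.getD a.1 []).getD a.2 false) (fun a => a.1 / 4) (fun a => a.2 / 2)
      (fun a m => m ||| ((pvDotBits.getD (a.1 % 4) []).getD (a.2 % 2) 0)) t0 x y hx hy
  rw [hE, h0]
  -- reorder the guard into a position test then the pixel test
  beta_reduce
  have hre := PySem.List.foldl_congr_mem
      (l := (List.range hN).flatMap (fun gr => (List.range wN).map (Prod.mk gr))) (init := (0:Nat))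
      (f := fun m (a : Nat × Nat) => if (grid.getD a.1 []).getD a.2 false = true ∧ a.1 / 4 = x ∧ a.2 / 2 = y then
        m ||| ((pvDotBits.getD (a.1 % 4) []).getD (a.2 % 2) 0) else m)
      (g := fun m (a : Nat × Nat) => if ((a.1 / 4 == x) && (a.2 / 2 == y) : Bool) then
        (if (grid.getD a.1 []).getD a.2 false then m ||| ((pvDotBits.getD (a.1 % 4) []).getD (a.2 % 2) 0) else m) else m)
      (by
        intro acc a _
        by_cases h1 : a.1 / 4 = x <;> by_cases h2 : a.2 / 2 = y <;>
          by_cases h3 : (grid.getD a.1 []).getD a.2 false <;> simp [h1, h2])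
  rw [hre]
  rw [← List.foldl_filter]
  -- compute the filtered index list
  rw [List.filter_flatMap]
  simp only [List.filter_map]
  have hcomp : ∀ gr : Nat, (fun a => ((a.1 / 4 == x) && (a.2 / 2 == y) : Bool)) ∘ (Prod.mk gr)
      = fun gc : Nat => ((gr / 4 == x) && (gc / 2 == y) : Bool) := by
    intro gr; funext gc; rfl
  simp only [hcomp]
  have hfil : ∀ gr : Nat, (List.range wN).filter (fun gc : Nat => ((gr / 4 == x) && (gc / 2 == y) : Bool))
      = if (gr / 4 == x : Bool) then (List.range wN).filter (fun gc => gc / 2 == y) else [] := by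
    intro gr
    by_cases h : gr / 4 = x
    · simp [h]
    · simp [h]
  simp only [hfil]
  simp only [apply_ite (List.map (Prod.mk _))]
  simp only [List.map_nil]
  rw [pvFlatMapIte]
  rw [List.foldl_flatMap]
  simp only [List.foldl_map]
  rw [pvFilterDiv 4 x (by norm_num) hN, pvFilterDiv 2 y (by norm_num) wN]
  rw [pvFoldBand (4*x) (min hN (4*x+4) - 4*x) 4 _ (by omega) 0]
  unfold pvCellMask
  apply PySem.List.foldl_congr_mem
  intro m r hr
  have hr4 := List.mem_range.mp hr
  by_cases hrd : r < min hN (4*x+4) - 4*x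
  · rw [if_pos hrd]
    have hb1 : 4*x+r < grid.length := (hH r hr4).mp (by omega)
    rw [pvFoldBand (2*y) (min wN (2*y+2) - 2*y) 2 _ (by omega) m]
    apply PySem.List.foldl_congr_mem
    intro m2 c hc
    have hc2 := List.mem_range.mp hc
    by_cases hcd : c < min wN (2*y+2) - 2*y
    · rw [if_pos hcd]
      have hb2 : 2*y+c < (grid.headD []).length := (hW c hc2).mp (by omega)
      rw [show (4*x+r) % 4 = r from by omega, show (2*y+c) % 2 = c from by omega]
      exact if_congr ⟨fun p => ⟨hb1, hb2, p⟩, fun p => p.2.2⟩ rfl rfl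
    · rw [if_neg hcd]
      have hb2 : ¬ (2*y+c < (grid.headD []).length) := fun hcon => hcd (by
        have := (hW c hc2).mpr hcon
        omega)
      rw [if_neg (by tauto)]
  · rw [if_neg hrd]
    have hb1 : ¬ (4*x+r < grid.length) := fun hcon => hrd (by
      have := (hH r hr4).mpr hcon
      omega)
    rw [show List.range 2 = [0, 1] from by decide]
    simp only [List.foldl_cons, List.foldl_nil]
    rw [if_neg (by tauto), if_neg (by tauto)]

theorem pvScatterShape (grid : List (List Bool)) (hN wN : Nat) (t0 : List (List Nat)) :
    (pvScatter grid hN wN t0).length = t0.length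
    ∧ ∀ x, ((pvScatter grid hN wN t0).getD x []).length = (t0.getD x []).length := by
  unfold pvScatter
  exact pvShapeFoldl _ _ _ _ _ t0

theorem pvB_eq (grid : List (List Bool)) (cell_cols cell_rows : Int) :
    grid_to_braille_alt grid cell_cols cell_rows =
      (List.range cell_rows.toNat).map (fun cri =>
        String.ofList ((List.range cell_cols.toNat).map (fun cci =>
          Char.ofNat (0x2800 + pvCellMask grid cri cci)))) := by
  rw [pvAlt_eq_scatter]
  by_cases hg : grid.isEmpty
  · rw [if_pos hg]
    have hnil : grid = [] := by simpa using hg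
    subst hnil
    have h0 : ∀ cri cci : Nat, pvCellMask [] cri cci = 0 := by
      intro cri cci
      simp [pvCellMask, show List.range 4 = [0,1,2,3] from by decide,
        show List.range 2 = [0,1] from by decide]
    rw [List.map_replicate]
    apply List.ext_getElem
    · simp
    · intro i h1 h2
      simp only [List.getElem_replicate, List.getElem_map, List.getElem_range]
      congr 1
      rw [List.map_replicate]
      apply List.ext_getElem
      · simp
      · intro j h3 h4
        simp [h0]
  · rw [if_neg hg]
    have hne : grid ≠ [] := by simpa using hg
    have hshape := pvScatterShape grid
      (min (grid.length : Int) (4 * cell_rows)).toNat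
      (min ((grid.headD []).length : Int) (2 * cell_cols)).toNat
      (List.replicate cell_rows.toNat (List.replicate cell_cols.toNat 0))
    have hlen : (pvScatter grid (min (grid.length : Int) (4 * cell_rows)).toNat
        (min ((grid.headD []).length : Int) (2 * cell_cols)).toNat
        (List.replicate cell_rows.toNat (List.replicate cell_cols.toNat 0))).length = cell_rows.toNat := by
      rw [hshape.1, List.length_replicate]
    have hMask : pvScatter grid (min (grid.length : Int) (4 * cell_rows)).toNat
        (min ((grid.headD []).length : Int) (2 * cell_cols)).toNat
        (List.replicate cell_rows.toNat (List.replicate cell_cols.toNat 0))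
        = (List.range cell_rows.toNat).map (fun x =>
            (List.range cell_cols.toNat).map (fun y => pvCellMask grid x y)) := by
      apply List.ext_getElem
      · rw [hlen]; simp
      · intro i h1 h2
        rw [List.getElem_map, List.getElem_range]
        have hiR : i < cell_rows.toNat := by rw [hlen] at h1; exact h1
        have hget : ∀ (l : List (List Nat)) (hh : i < l.length), l[i] = l.getD i [] := by
          intro l hh
          rw [List.getD_eq_getElem?_getD, List.getElem?_eq_getElem hh]
          rfl
        have ht0i : (List.replicate cell_rows.toNat (List.replicate cell_cols.toNat 0)).getD i []
            = List.replicate cell_cols.toNat 0 := by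
          rw [List.getD_eq_getElem?_getD, List.getElem?_replicate, if_pos hiR]
          rfl
        have ht0rowlen : ((List.replicate cell_rows.toNat (List.replicate cell_cols.toNat 0)).getD i []).length = cell_cols.toNat := by
          rw [ht0i, List.length_replicate]
        have hrowlen : ((pvScatter grid (min (grid.length : Int) (4 * cell_rows)).toNat
            (min ((grid.headD []).length : Int) (2 * cell_cols)).toNat
            (List.replicate cell_rows.toNat (List.replicate cell_cols.toNat 0))).getD i []).length = cell_cols.toNat := by
          rw [hshape.2 i, ht0rowlen]
        apply List.ext_getElem
        · rw [hget _ h1, hrowlen]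
          simp
        · intro j h3 h4
          have hjC : j < cell_cols.toNat := by
            rw [hget _ h1, hrowlen] at h3
            exact h3
          rw [List.getElem_map, List.getElem_range]
          have ht0row : ((List.replicate cell_rows.toNat (List.replicate cell_cols.toNat 0)).getD i []).getD j 0 = 0 := by
            rw [ht0i, List.getD_eq_getElem?_getD, List.getElem?_replicate]
            split <;> rfl
          have hentry := pvScatterEntry grid
            (min (grid.length : Int) (4 * cell_rows)).toNat
            (min ((grid.headD []).length : Int) (2 * cell_cols)).toNat
            i j (List.replicate cell_rows.toNat (List.replicate cell_cols.toNat 0))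
            (by rw [List.length_replicate]; exact hiR)
            (by rw [ht0rowlen]; exact hjC)
            ht0row
            (by intro r hr; omega)
            (by intro c hc; omega)
          rw [← hentry, ← hget _ h1, List.getD_eq_getElem?_getD, List.getElem?_eq_getElem h3]
          rfl
    rw [hMask, List.map_map]
    apply List.map_congr_left
    intro cri _
    simp only [Function.comp_apply, List.map_map, Function.comp_def]

-- ===== VERDICT (by name: the statement is the Claim_ definition above) =====
theorem grid_to_braille_spec : Claim_equal_grid_to_braille := by
  intro grid cell_cols cell_rows _ _
  unfold Spec_grid_to_braille
  rw [pvA_eq, pvB_eq]
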